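-- pv_equiv track=rewrite | github.com/daniel117622/iteration_spaces | iterspace_behaviours.py | tuple_matcher
-- ===== SOURCE A (Python) =====
-- from typing import List
--
-- def tuple_matcher(tp1 : List[List[int]],tp2 : List[List[int]]):
--     predict = []
--     myspace = []
--     i : int = 0
--     for a_tuple in tp1:
--         j : int = 0
--         for b_tuple in tp2:
--             if a_tuple[1] == b_tuple[0]:
--                 predict.append([*a_tuple, b_tuple[1]])
--                 myspace.append([i,j])
--                 j += 1
--                 pass
--         i += 1
--     return predict, myspace
-- ===== SOURCE B (Python) =====
-- from typing import List
--
-- def tuple_matcher(tp1 : List[List[int]], tp2 : List[List[int]]):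
--     # a join with an empty side is empty
--     if not tp1 or not tp2:
--         return [], []
--     index = {}
--     for b in tp2:
--         index.setdefault(b[0], []).append(b)
--     predict = []
--     myspace = []
--     for i, a in enumerate(tp1):
--         for j, b in enumerate(index.get(a[1], [])):
--             predict.append([*a, b[1]])
--             myspace.append([i, j])
--     return predict, myspace
-- ===== Notes on version B (the rewrite author's own statement) =====
-- stated objective: alternative
-- what changed: Replaces the nested scan of tp2 inside the tp1 loop by a hash join: tp2 is indexed once into a dict of buckets keyed by b[0] and each tp1 row looks its bucket up directly; on the match-dense timing inputs the output itself dominates, so no speed is claimed.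
import Mathlib
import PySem

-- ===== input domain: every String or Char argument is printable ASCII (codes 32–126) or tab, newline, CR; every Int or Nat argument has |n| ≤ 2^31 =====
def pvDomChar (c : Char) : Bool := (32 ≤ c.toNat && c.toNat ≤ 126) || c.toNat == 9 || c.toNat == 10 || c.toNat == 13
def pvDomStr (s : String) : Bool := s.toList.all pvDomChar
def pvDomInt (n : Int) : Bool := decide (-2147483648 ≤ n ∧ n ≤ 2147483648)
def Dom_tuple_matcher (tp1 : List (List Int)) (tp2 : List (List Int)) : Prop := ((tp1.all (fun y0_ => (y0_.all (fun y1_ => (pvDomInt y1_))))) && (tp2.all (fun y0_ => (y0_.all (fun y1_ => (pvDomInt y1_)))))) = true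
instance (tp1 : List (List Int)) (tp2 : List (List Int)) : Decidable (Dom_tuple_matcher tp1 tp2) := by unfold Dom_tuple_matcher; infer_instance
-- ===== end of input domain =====

-- B replaces A's nested scan of tp2 by a hash join: tp2 indexed once into buckets keyed by b[0] (alternative algorithm; no speed claimed).


-- ===== PORT A =====
-- literal transliteration: nested foldl over tp1 then tp2 with state (predict, myspace, i) / inner (predict, myspace, j)
def tuple_matcher (tp1 : List (List Int)) (tp2 : List (List Int)) : List (List Int) × List (List Int) :=
  let r := tp1.foldl (fun st a =>
    let inner := tp2.foldl (fun st2 b =>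
      if PySem.List.pyGetD a 1 0 = PySem.List.pyGetD b 0 0 then
        (st2.1 ++ [a ++ [PySem.List.pyGetD b 1 0]], st2.2.1 ++ [[st.2.2, st2.2.2]], st2.2.2 + 1)
      else st2) (st.1, st.2.1, (0 : Int))
    (inner.1, inner.2.1, st.2.2 + 1))
    (([] : List (List Int)), ([] : List (List Int)), (0 : Int))
  (r.1, r.2.1)

-- ===== PORT B =====
-- index.setdefault(b[0], []).append(b) over tp2
def pvIndex (tp2 : List (List Int)) : PySem.Dict Int (List (List Int)) :=
  tp2.foldl (fun d b => d.modify (PySem.List.pyGetD b 0 0) [] (· ++ [b])) PySem.Dict.empty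

def tuple_matcher_alt (tp1 : List (List Int)) (tp2 : List (List Int)) : List (List Int) × List (List Int) :=
  if tp1 = [] ∨ tp2 = [] then ([], [])
  else
    let index := pvIndex tp2
    (PySem.List.enumerate tp1 0).foldl (fun st q =>
      (PySem.List.enumerate (index.getD (PySem.List.pyGetD q.2 1 0) []) 0).foldl
        (fun st2 r => (st2.1 ++ [q.2 ++ [PySem.List.pyGetD r.2 1 0]], st2.2 ++ [[q.1, r.1]])) st)
      (([] : List (List Int)), ([] : List (List Int)))

-- ===== PRECONDITION & SPEC =====
-- Pre_ excludes exactly the inputs on which Python A raises IndexError: with both lists nonempty,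
-- a tp1 row without index 1, a tp2 row without index 0, or a length-1 tp2 row that gets matched
-- and is therefore subscripted at 1; on every input where A returns a value, Pre_ holds.
def Pre_tuple_matcher (tp1 : List (List Int)) (tp2 : List (List Int)) : Prop :=
  tp1 = [] ∨ tp2 = [] ∨
  ((∀ a ∈ tp1, 2 ≤ a.length) ∧
   (∀ b ∈ tp2, 1 ≤ b.length ∧ (b.length = 1 → ∀ a ∈ tp1, a.getD 1 0 ≠ b.getD 0 0)))
instance (tp1 : List (List Int)) (tp2 : List (List Int)) : Decidable (Pre_tuple_matcher tp1 tp2) := by unfold Pre_tuple_matcher; infer_instance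

def pvWitness_tuple_matcher : List (List Int) × List (List Int) := ([[1, 2], [3, 4]], [[2, 5], [4, 6], [2, 7]])

def Spec_tuple_matcher (tp1 : List (List Int)) (tp2 : List (List Int)) (out : List (List Int) × List (List Int)) : Prop := out = tuple_matcher_alt tp1 tp2
instance (tp1 : List (List Int)) (tp2 : List (List Int)) (out : List (List Int) × List (List Int)) : Decidable (Spec_tuple_matcher tp1 tp2 out) := by unfold Spec_tuple_matcher; infer_instance

-- ===== CLAIM (what is proved, stated in full; the proofs are below) =====
def Claim_equal_tuple_matcher : Prop := ∀ (tp1 : List (List Int)) (tp2 : List (List Int)), Dom_tuple_matcher tp1 tp2 → Pre_tuple_matcher tp1 tp2 → Spec_tuple_matcher tp1 tp2 (tuple_matcher tp1 tp2)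

-- ===== LEMMAS AND PROOFS =====

-- the tp2 rows matching row a, in tp2 order
def pvMatched (a : List Int) (tp2 : List (List Int)) : List (List Int) :=
  tp2.filter (fun b => PySem.List.pyGetD b 0 0 == PySem.List.pyGetD a 1 0)

-- B's bucket for key k is the tp2 rows whose b[0] equals k, in tp2 order
lemma pvIndex_getD (tp2 : List (List Int)) (k : Int) :
    (pvIndex tp2).getD k [] = tp2.filter (fun b => PySem.List.pyGetD b 0 0 == k) := by
  unfold pvIndex
  rw [show (tp2.foldl (fun d b => d.modify (PySem.List.pyGetD b 0 0) [] (· ++ [b])) PySem.Dict.empty)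
      = ((tp2.map (fun b => (PySem.List.pyGetD b 0 0, b))).foldl (fun d p => d.modify p.1 [] (· ++ [p.2])) PySem.Dict.empty)
    from (List.foldl_map (f := fun (b : List Int) => (PySem.List.pyGetD b 0 0, b)) (g := fun (d : PySem.Dict Int (List (List Int))) p => d.modify p.1 [] (· ++ [p.2]))).symm]
  rw [PySem.Dict.getD_foldl_modify_append]
  simp [List.filter_map, Function.comp_def]

-- A's inner loop appends one joined row per matching tp2 row and numbers them 0,1,2,…
lemma innerA (a : List Int) (i : Int) (tp2 : List (List Int)) (p m : List (List Int)) (j0 : Int) :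
    tp2.foldl (fun st2 b =>
      if PySem.List.pyGetD a 1 0 = PySem.List.pyGetD b 0 0 then
        (st2.1 ++ [a ++ [PySem.List.pyGetD b 1 0]], st2.2.1 ++ [[i, st2.2.2]], st2.2.2 + 1)
      else st2) (p, m, j0)
    = (p ++ (pvMatched a tp2).map (fun b => a ++ [PySem.List.pyGetD b 1 0]),
       m ++ (List.range (pvMatched a tp2).length).map (fun (k : Nat) => [i, j0 + (k : Int)]),
       j0 + ((pvMatched a tp2).length : Int)) := by
  induction tp2 generalizing p m j0 with
  | nil => simp [pvMatched]
  | cons b bs ih =>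
    by_cases h : PySem.List.pyGetD a 1 0 = PySem.List.pyGetD b 0 0
    · rw [List.foldl_cons, if_pos h, ih]
      have hm : pvMatched a (b :: bs) = b :: pvMatched a bs := by
        simp [pvMatched, h.symm]
      rw [hm]
      refine Prod.ext ?_ (Prod.ext ?_ ?_)
      · simp
      · show m ++ [[i, j0]] ++ _ = m ++ _
        rw [List.length_cons, List.range_succ_eq_map, List.map_cons, List.map_map, List.append_assoc]
        simp only [List.singleton_append, Nat.cast_zero, add_zero, Function.comp_def]
        congr 2
        apply List.map_congr_left
        intro k _
        push_cast
        ring_nf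
      · simp; ring
    · rw [List.foldl_cons, if_neg h, ih]
      have hm : pvMatched a (b :: bs) = pvMatched a bs := by
        unfold pvMatched
        rw [List.filter_cons_of_neg (by simp [beq_iff_eq]; exact fun hc => h hc.symm)]
      rw [hm]

-- B's inner loop over the enumerated bucket, in closed form
lemma innerB (a : List Int) (i : Int) (bucket : List (List Int)) (p m : List (List Int)) (j0 : Int) :
    (PySem.List.enumerate bucket j0).foldl
      (fun st2 r => (st2.1 ++ [a ++ [PySem.List.pyGetD r.2 1 0]], st2.2 ++ [[i, r.1]])) (p, m)
    = (p ++ bucket.map (fun b => a ++ [PySem.List.pyGetD b 1 0]),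
       m ++ (List.range bucket.length).map (fun (k : Nat) => [i, j0 + (k : Int)])) := by
  induction bucket generalizing p m j0 with
  | nil => simp [PySem.List.enumerate_nil]
  | cons b bs ih =>
    rw [PySem.List.enumerate_cons, List.foldl_cons]
    dsimp only
    rw [ih]
    refine Prod.ext ?_ ?_
    · simp
    · show m ++ [[i, j0]] ++ _ = m ++ _
      rw [List.length_cons, List.range_succ_eq_map, List.map_cons, List.map_map, List.append_assoc]
      simp only [List.singleton_append, Nat.cast_zero, add_zero, Function.comp_def]
      congr 2
      apply List.map_congr_left
      intro k _
      push_cast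
      ring_nf

-- A's outer loop and B's enumerate loop produce the same (predict, myspace) from any start
lemma outerAB (tp2 : List (List Int)) (tp1 : List (List Int)) (p m : List (List Int)) (i : Int) :
    ((tp1.foldl (fun st a =>
        let inner := tp2.foldl (fun st2 b =>
          if PySem.List.pyGetD a 1 0 = PySem.List.pyGetD b 0 0 then
            (st2.1 ++ [a ++ [PySem.List.pyGetD b 1 0]], st2.2.1 ++ [[st.2.2, st2.2.2]], st2.2.2 + 1)
          else st2) (st.1, st.2.1, (0 : Int))
        (inner.1, inner.2.1, st.2.2 + 1)) (p, m, i)).1,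
     (tp1.foldl (fun st a =>
        let inner := tp2.foldl (fun st2 b =>
          if PySem.List.pyGetD a 1 0 = PySem.List.pyGetD b 0 0 then
            (st2.1 ++ [a ++ [PySem.List.pyGetD b 1 0]], st2.2.1 ++ [[st.2.2, st2.2.2]], st2.2.2 + 1)
          else st2) (st.1, st.2.1, (0 : Int))
        (inner.1, inner.2.1, st.2.2 + 1)) (p, m, i)).2.1)
    = (PySem.List.enumerate tp1 i).foldl (fun st q =>
        (PySem.List.enumerate ((pvIndex tp2).getD (PySem.List.pyGetD q.2 1 0) []) 0).foldl
          (fun st2 r => (st2.1 ++ [q.2 ++ [PySem.List.pyGetD r.2 1 0]], st2.2 ++ [[q.1, r.1]])) st)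
        (p, m) := by
  induction tp1 generalizing p m i with
  | nil => simp [PySem.List.enumerate_nil]
  | cons a tl ih =>
    rw [List.foldl_cons, PySem.List.enumerate_cons, List.foldl_cons]
    dsimp only
    rw [innerA a i tp2 p m 0]
    dsimp only
    rw [ih]
    have hb : (pvIndex tp2).getD (PySem.List.pyGetD a 1 0) [] = pvMatched a tp2 := by
      rw [pvIndex_getD]; rfl
    rw [hb, innerB a i (pvMatched a tp2) p m 0]

-- with tp2 empty, A's inner loop never runs, so predict/myspace stay empty
lemma A_nil2 (tp1 : List (List Int)) : tuple_matcher tp1 [] = ([], []) := by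
  unfold tuple_matcher
  dsimp only
  suffices h : ∀ (p m : List (List Int)) (i : Int),
      (tp1.foldl (fun st a =>
        let inner := ([] : List (List Int)).foldl (fun st2 b =>
          if PySem.List.pyGetD a 1 0 = PySem.List.pyGetD b 0 0 then
            (st2.1 ++ [a ++ [PySem.List.pyGetD b 1 0]], st2.2.1 ++ [[st.2.2, st2.2.2]], st2.2.2 + 1)
          else st2) (st.1, st.2.1, (0 : Int))
        (inner.1, inner.2.1, st.2.2 + 1)) (p, m, i)).1 = p ∧
      (tp1.foldl (fun st a =>
        let inner := ([] : List (List Int)).foldl (fun st2 b =>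
          if PySem.List.pyGetD a 1 0 = PySem.List.pyGetD b 0 0 then
            (st2.1 ++ [a ++ [PySem.List.pyGetD b 1 0]], st2.2.1 ++ [[st.2.2, st2.2.2]], st2.2.2 + 1)
          else st2) (st.1, st.2.1, (0 : Int))
        (inner.1, inner.2.1, st.2.2 + 1)) (p, m, i)).2.1 = m by
    exact Prod.ext (h [] [] 0).1 (h [] [] 0).2
  induction tp1 with
  | nil => intro p m i; exact ⟨rfl, rfl⟩
  | cons a tl ih => intro p m i; exact ih p m (i + 1)

-- ===== VERDICT (by name: the statement is the Claim_ definition above) =====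
theorem tuple_matcher_spec : Claim_equal_tuple_matcher := by
  intro tp1 tp2 _ _
  unfold Spec_tuple_matcher tuple_matcher_alt
  by_cases hg : tp1 = [] ∨ tp2 = []
  · rw [if_pos hg]
    rcases hg with h | h
    · subst h; rfl
    · subst h; exact A_nil2 tp1
  · rw [if_neg hg]
    unfold tuple_matcher
    exact outerAB tp2 tp1 [] [] 0
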